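-- pv_equiv track=rewrite | github.com/johnyu916/yury | shared/common.py | get_bools
-- ===== SOURCE A (Python) =====
-- import math
--
-- def power(exponent):
--     '''
--     Return 2^exponent.
--     '''
--     return int(math.pow(2,exponent))
--
-- def log(integer):
--     return int(math.log(integer,2))
--
-- def get_bools(integer, number_digits):
--     '''
--     Get list of bools from integer
--     keep decreasing integer as binary digits are filled.
--     '''
--     bools = [False]*number_digits
--     while(True):
--         if integer == 0: break
--         #highest = int(math.log(integer,2))
--         highest = log(integer)
--         if highest < number_digits:
--             bools[highest] = True
--         #integer -= int(math.pow(2,highest))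
--         integer -= power(highest)
--     return bools
-- ===== SOURCE B (Python) =====
-- def get_bools(integer, number_digits):
--     '''
--     Get list of bools from integer: bit i of the integer, read positionally.
--     '''
--     return [(integer >> i) & 1 == 1 for i in range(number_digits)]
-- ===== Notes on version B (the rewrite author's own statement) =====
-- stated objective: simpler
-- what changed: Replaced A's destructive highest-bit-extraction loop (locate top bit with math.log, subtract math.pow, repeat until zero) by a single comprehension that reads each bit positionally with (integer >> i) & 1.
import Mathlib
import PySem

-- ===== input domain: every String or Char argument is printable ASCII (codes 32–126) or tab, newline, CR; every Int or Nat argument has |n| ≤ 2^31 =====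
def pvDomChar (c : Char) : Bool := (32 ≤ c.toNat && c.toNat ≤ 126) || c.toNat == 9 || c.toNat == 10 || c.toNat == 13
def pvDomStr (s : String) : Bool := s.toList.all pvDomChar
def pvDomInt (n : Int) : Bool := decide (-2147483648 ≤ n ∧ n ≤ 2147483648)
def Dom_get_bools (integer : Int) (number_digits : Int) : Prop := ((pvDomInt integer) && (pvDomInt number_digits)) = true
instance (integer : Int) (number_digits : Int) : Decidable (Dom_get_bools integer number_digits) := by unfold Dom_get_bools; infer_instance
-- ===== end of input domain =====

-- B replaces A's destructive highest-bit-extraction loop (math.log to locate the top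
-- bit, math.pow to subtract it, repeat until zero) by one comprehension reading each
-- bit positionally (integer // 2**i % 2); objective: simpler.

-- ===== PORT A =====
-- int(math.pow(2, exponent)): exact for the nonnegative exponents A passes (≤ 31 on Dom).
def pv_power (exponent : Int) : Int := 2 ^ exponent.toNat
-- int(math.log(integer, 2)) = floor log2: exact for 1 ≤ integer ≤ 2^31 (checked against CPython).
def pv_log (integer : Int) : Int := ((Nat.log 2 integer.toNat : Nat) : Int)

-- the 'while True' loop; fuel integer.toNat + 1 suffices: each pass strictly decreases integer.
def get_bools_loop (number_digits : Int) (fuel : Nat) (integer : Int) (bools : List Bool) : List Bool :=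
  match fuel with
  | 0 => bools
  | fuel + 1 =>
    if integer = 0 then bools
    else
      let highest := pv_log integer
      let bools' := if highest < number_digits then bools.set highest.toNat true else bools
      get_bools_loop number_digits fuel (integer - pv_power highest) bools'

def get_bools (integer : Int) (number_digits : Int) : List Bool :=
  get_bools_loop number_digits (integer.toNat + 1) integer (List.replicate number_digits.toNat false)

-- ===== PORT B =====
-- Python's 'x >> k' is core Lean's 'x >>> k' (k = i.toNat, exact: i comes from range, i ≥ 0).
def get_bools_alt (integer : Int) (number_digits : Int) : List Bool :=
  (PySem.List.pyRange 0 number_digits 1).map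
    (fun i => PySem.Int.band (integer >>> i.toNat) 1 == 1)

-- ===== PRECONDITION & SPEC =====
-- Pre_ excludes integer < 0, where A raises ValueError (math.log of a non-positive number).
def Pre_get_bools (integer : Int) (number_digits : Int) : Prop := 0 ≤ integer
instance (integer : Int) (number_digits : Int) : Decidable (Pre_get_bools integer number_digits) := by unfold Pre_get_bools; infer_instance
def pvWitness_get_bools : Int × Int := (5, 3)

def Spec_get_bools (integer : Int) (number_digits : Int) (out : List Bool) : Prop := out = get_bools_alt integer number_digits
instance (integer : Int) (number_digits : Int) (out : List Bool) : Decidable (Spec_get_bools integer number_digits out) := by unfold Spec_get_bools; infer_instance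

-- ===== CLAIM (what is proved, stated in full; the proofs are below) =====
def Claim_equal_get_bools : Prop := ∀ (integer : Int) (number_digits : Int), Dom_get_bools integer number_digits → Pre_get_bools integer number_digits → Spec_get_bools integer number_digits (get_bools integer number_digits)

-- ===== LEMMAS AND PROOFS =====

lemma testBit_eq_div_mod (n i : Nat) : n.testBit i = decide (n / 2 ^ i % 2 = 1) := by
  rw [Nat.testBit, Nat.shiftRight_eq_div_pow, Nat.one_and_eq_mod_two]
  rcases Nat.mod_two_eq_zero_or_one (n / 2 ^ i) with h | h <;> simp [h]

lemma testBit_log_true {n : Nat} (hn : 0 < n) : n.testBit (Nat.log 2 n) = true := by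
  rw [testBit_eq_div_mod]
  have h1 : 2 ^ Nat.log 2 n ≤ n := Nat.pow_log_le_self 2 (by omega)
  have h2 : n < 2 ^ (Nat.log 2 n + 1) := Nat.lt_pow_succ_log_self (by omega) n
  have hq : n / 2 ^ Nat.log 2 n = 1 := by
    rw [pow_succ] at h2
    exact Nat.div_eq_of_lt_le (by omega) (by omega)
  simp [hq]

lemma testBit_sub_pow_eq {n i h : Nat} (hh : h = Nat.log 2 n) (hn : 0 < n) (hih : i ≠ h) :
    (n - 2 ^ h).testBit i = n.testBit i := by
  have h1 : 2 ^ h ≤ n := hh ▸ Nat.pow_log_le_self 2 (by omega)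
  have h2 : n < 2 ^ (h + 1) := hh ▸ Nat.lt_pow_succ_log_self (by omega) n
  rcases lt_or_gt_of_ne hih with hlt | hgt
  · -- i < h: dividing by 2^i, the removed 2^h contributes an even amount
    rw [testBit_eq_div_mod, testBit_eq_div_mod]
    have hsplit : n = (n - 2 ^ h) + 2 ^ (h - i - 1) * 2 * 2 ^ i := by
      have : 2 ^ (h - i - 1) * 2 * 2 ^ i = 2 ^ h := by
        rw [mul_assoc, mul_comm 2 (2 ^ i), ← pow_succ, ← pow_add]
        congr 1; omega
      omega
    rw [decide_eq_decide]
    conv_rhs => rw [hsplit]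
    rw [Nat.add_mul_div_right _ _ (Nat.two_pow_pos i)]
    omega
  · -- i > h: both n and n - 2^h are below 2^i
    have hi : n < 2 ^ i := lt_of_lt_of_le h2 (Nat.pow_le_pow_right (by omega) (by omega))
    rw [Nat.testBit_eq_false_of_lt (by omega), Nat.testBit_eq_false_of_lt (by omega)]

lemma loop_spec (nd : Int) : ∀ (fuel n : Nat) (bools : List Bool), n ≤ fuel →
    bools.length = nd.toNat →
    get_bools_loop nd fuel (n : Int) bools = bools.mapIdx (fun i b => b || n.testBit i) := by
  intro fuel
  induction fuel with
  | zero =>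
    intro n bools hle _
    have hn : n = 0 := by omega
    subst hn
    apply List.ext_getElem (by simp [get_bools_loop])
    intro i h1 h2
    simp [get_bools_loop]
  | succ fuel ih =>
    intro n bools hle hlen
    by_cases h0 : n = 0
    · subst h0
      apply List.ext_getElem (by simp [get_bools_loop])
      intro i h1 h2
      simp [get_bools_loop]
    · have hnpos : 0 < n := Nat.pos_of_ne_zero h0
      have hlog : pv_log (n : Int) = ((Nat.log 2 n : Nat) : Int) := by
        simp [pv_log]
      set h := Nat.log 2 n with hh
      have h1 : 2 ^ h ≤ n := Nat.pow_log_le_self 2 h0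
      have hsub : (n : Int) - pv_power ((h : Nat) : Int) = ((n - 2 ^ h : Nat) : Int) := by
        simp only [pv_power, Int.toNat_natCast, Nat.cast_sub h1]
        push_cast
        ring
      have hn' : n - 2 ^ h ≤ fuel := by
        have : 0 < 2 ^ h := Nat.two_pow_pos h
        omega
      rw [get_bools_loop]
      simp only [hlog, hsub]
      split
      · exact absurd (by exact_mod_cast ‹(n : Int) = 0›) h0
      · by_cases hcase : ((h : Nat) : Int) < nd
        · rw [if_pos hcase]
          have hlenset : (bools.set ((h : Nat) : Int).toNat true).length = nd.toNat := by
            simpa using hlen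
          rw [ih (n - 2 ^ h) _ hn' hlenset]
          have hcast : (h : Int) < nd := hcase
          have hhlt : h < bools.length := by
            rw [hlen]; omega
          apply List.ext_getElem (by simp)
          intro i hi1 hi2
          simp only [List.getElem_mapIdx, Int.toNat_natCast]
          by_cases hih : i = h
          · subst hih
            rw [List.getElem_set_self (by simpa using hhlt), testBit_log_true hnpos]
            simp
          · rw [List.getElem_set_ne (by omega), testBit_sub_pow_eq hh hnpos hih]
        · rw [if_neg hcase]
          rw [ih (n - 2 ^ h) _ hn' hlen]
          apply List.ext_getElem (by simp)
          intro i hi1 hi2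
          simp only [List.getElem_mapIdx]
          have hcast : ¬ (h : Int) < nd := hcase
          have hih : i ≠ h := by
            have hi3 : i < bools.length := by simpa using hi1
            rw [hlen] at hi3
            omega
          rw [testBit_sub_pow_eq hh hnpos hih]

lemma alt_getElem (n : Nat) (nd : Int) (k : Nat) (hk : k < (PySem.List.pyRange 0 nd 1).length) :
    (get_bools_alt (n : Int) nd)[k]'(by simpa [get_bools_alt] using hk) = n.testBit k := by
  simp only [get_bools_alt, List.getElem_map, PySem.List.getElem_pyRange_one, zero_add,
    Int.toNat_natCast]
  have h1 : (n : Int) >>> ((k : Nat) : Int) = ((n >>> k : Nat) : Int) := by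
    simp [Int.shiftRight_natCast, Int.natCast_shiftRight]
  rw [h1, PySem.Int.band_one]
  have h2 : PySem.Int.mod ((n >>> k : Nat) : Int) 2 = ((n >>> k % 2 : Nat) : Int) := by
    exact_mod_cast PySem.Int.mod_natCast (n >>> k) 2
  rw [h2, testBit_eq_div_mod, Nat.shiftRight_eq_div_pow]
  rcases Nat.mod_two_eq_zero_or_one (n / 2 ^ k) with h | h <;> simp [h]

-- ===== VERDICT (by name: the statement is the Claim_ definition above) =====
theorem get_bools_spec : Claim_equal_get_bools := by
  intro integer nd _ hpre
  unfold Spec_get_bools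
  have hn : integer = ((integer.toNat : Nat) : Int) := by
    unfold Pre_get_bools at hpre; omega
  rw [hn]
  unfold get_bools
  rw [Int.toNat_natCast,
    loop_spec nd (integer.toNat + 1) integer.toNat _ (by omega) (by simp)]
  apply List.ext_getElem
  · simp [get_bools_alt, PySem.List.length_pyRange_one]
  · intro i h1 h2
    have hi : i < (PySem.List.pyRange 0 nd 1).length := by
      simpa [get_bools_alt] using h2
    rw [alt_getElem integer.toNat nd i hi]
    simp [List.getElem_mapIdx]
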